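-- pv_equiv track=rewrite | github.com/qiboteam/qibo-core | crates/py/qibo_core/einsum_utils.py | control_order
-- ===== SOURCE A (Python) =====
-- def control_order(targets, controls, nqubits):
--     loop_start = 0
--     order = list(controls)
--     controlled_targets = list(targets)
--     for control in controls:
--         for i in range(loop_start, control):
--             order.append(i)
--         loop_start = control + 1
--         for i, t in enumerate(targets):
--             if t > control:
--                 controlled_targets[i] -= 1
--     for i in range(loop_start, nqubits):
--         order.append(i)
--     return order, controlled_targets
-- ===== SOURCE B (Python) =====
-- def control_order(targets, controls, nqubits):
--     # Order: controls first, then the gaps between consecutive control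
--     # boundaries, read off from zipped (start, stop) boundary lists.
--     starts = [0] + [c + 1 for c in controls]
--     stops = controls + [nqubits]
--     order = list(controls)
--     for lo, hi in zip(starts, stops):
--         order.extend(range(lo, hi))
--     # Targets: each target drops by the number of controls below it,
--     # found by binary search on the sorted controls (no bisect import,
--     # since the original module imports nothing).
--     sc = sorted(controls)
--     n = len(sc)
--     controlled_targets = []
--     for t in targets:
--         lo, hi = 0, n
--         while lo < hi:
--             mid = (lo + hi) // 2
--             if sc[mid] < t:
--                 lo = mid + 1
--             else:
--                 hi = mid
--         controlled_targets.append(t - lo)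
--     return order, controlled_targets
-- ===== Notes on version B (the rewrite author's own statement) =====
-- stated objective: faster
-- what changed: B replaces A's nested controls-by-targets decrement scan with one sort of the controls plus a binary search per target counting controls below it, and builds the order by zipping boundary lists (control+1 starts with control/nqubits stops) instead of carrying a running loop_start.
import Mathlib
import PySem

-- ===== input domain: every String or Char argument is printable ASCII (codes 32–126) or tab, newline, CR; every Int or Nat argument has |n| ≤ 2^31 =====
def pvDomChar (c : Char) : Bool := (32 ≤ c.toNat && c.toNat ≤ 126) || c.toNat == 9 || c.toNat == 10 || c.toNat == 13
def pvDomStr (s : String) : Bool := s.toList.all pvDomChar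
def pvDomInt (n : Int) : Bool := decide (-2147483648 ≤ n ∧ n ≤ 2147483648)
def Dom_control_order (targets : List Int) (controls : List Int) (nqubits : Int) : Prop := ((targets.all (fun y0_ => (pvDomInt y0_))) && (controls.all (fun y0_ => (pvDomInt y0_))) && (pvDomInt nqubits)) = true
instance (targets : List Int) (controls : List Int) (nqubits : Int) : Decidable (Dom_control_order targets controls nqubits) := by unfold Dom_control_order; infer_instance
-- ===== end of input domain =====

-- B replaces A's nested controls×targets decrement scan by one sort of the controls
-- plus a binary search per target, and reads the gap ranges off zipped boundary lists.

-- ===== PORT A =====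
-- state = (loop_start, order, controlled_targets); the enumerate-and-decrement inner
-- loop over targets is the zipWith of targets with the current controlled_targets.
def control_order (targets : List Int) (controls : List Int) (nqubits : Int) : List Int × List Int :=
  let st := controls.foldl
    (fun (s : Int × List Int × List Int) control =>
      let order := s.2.1 ++ PySem.List.pyRange s.1 control
      let loop_start := control + 1
      let ct := List.zipWith (fun t c => if t > control then c - 1 else c) targets s.2.2
      (loop_start, order, ct))
    (0, controls, targets)
  (st.2.1 ++ PySem.List.pyRange st.1 nqubits, st.2.2)

-- ===== PORT B =====
-- the hand-written `while lo < hi` binary search of Source B (lo, hi are Nat indices,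
-- always within [0, sc.length]; Python's (lo+hi)//2 on them is Nat division)
def bsearchCount (sc : List Int) (t : Int) (lo hi : Nat) : Nat :=
  if _h : lo < hi then
    let mid := (lo + hi) / 2
    if sc.getD mid 0 < t then bsearchCount sc t (mid + 1) hi   -- sc[mid]: mid < hi ≤ sc.length
    else bsearchCount sc t lo mid
  else lo
termination_by hi - lo
decreasing_by all_goals omega

def control_order_alt (targets : List Int) (controls : List Int) (nqubits : Int) : List Int × List Int :=
  let starts := 0 :: controls.map (· + 1)
  let stops := controls ++ [nqubits]
  let order := (starts.zip stops).foldl (fun ord p => ord ++ PySem.List.pyRange p.1 p.2) controls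
  let sc := PySem.List.sorted controls (fun x => x)
  let ct := targets.foldl (fun acc t => acc ++ [t - (bsearchCount sc t 0 sc.length : Int)]) []
  (order, ct)

-- ===== PRECONDITION & SPEC =====
def Spec_control_order (targets : List Int) (controls : List Int) (nqubits : Int) (out : List Int × List Int) : Prop := out = control_order_alt targets controls nqubits
instance (targets : List Int) (controls : List Int) (nqubits : Int) (out : List Int × List Int) : Decidable (Spec_control_order targets controls nqubits out) := by unfold Spec_control_order; infer_instance

-- ===== CLAIM (what is proved, stated in full; the proofs are below) =====
def Claim_equal_control_order : Prop := ∀ (targets : List Int) (controls : List Int) (nqubits : Int), Dom_control_order targets controls nqubits → Spec_control_order targets controls nqubits (control_order targets controls nqubits)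

-- ===== LEMMAS AND PROOFS =====

-- A's fold splits into a (loop_start, order) fold and a controlled_targets fold.
lemma foldA_split (targets cs : List Int) (ls : Int) (ord ct : List Int) :
    cs.foldl
      (fun (s : Int × List Int × List Int) control =>
        (control + 1,
         s.2.1 ++ PySem.List.pyRange s.1 control,
         List.zipWith (fun t c => if t > control then c - 1 else c) targets s.2.2))
      (ls, ord, ct)
    = ((cs.foldl (fun (s : Int × List Int) control =>
          (control + 1, s.2 ++ PySem.List.pyRange s.1 control)) (ls, ord)).1,
       (cs.foldl (fun (s : Int × List Int) control =>
          (control + 1, s.2 ++ PySem.List.pyRange s.1 control)) (ls, ord)).2,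
       cs.foldl (fun ct control =>
          List.zipWith (fun t c => if t > control then c - 1 else c) targets ct) ct) := by
  induction cs generalizing ls ord ct with
  | nil => rfl
  | cons c cs ih => simp only [List.foldl_cons]; exact ih _ _ _

-- the (loop_start, order) fold followed by the trailing range IS B's boundary-zip fold
lemma order_eq (cs : List Int) (ls nq : Int) (ord : List Int) :
    (cs.foldl (fun (s : Int × List Int) control =>
        (control + 1, s.2 ++ PySem.List.pyRange s.1 control)) (ls, ord)).2
      ++ PySem.List.pyRange
           (cs.foldl (fun (s : Int × List Int) control =>
              (control + 1, s.2 ++ PySem.List.pyRange s.1 control)) (ls, ord)).1 nq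
    = ((ls :: cs.map (· + 1)).zip (cs ++ [nq])).foldl
        (fun ord p => ord ++ PySem.List.pyRange p.1 p.2) ord := by
  induction cs generalizing ls ord with
  | nil => rfl
  | cons c cs ih =>
      simp only [List.foldl_cons, List.map_cons, List.cons_append, List.zip_cons_cons]
      exact ih (c + 1) (ord ++ PySem.List.pyRange ls c)

-- the repeated zipWith-decrement fold computes, per target, the count of controls below it
lemma ct_fold (targets cs : List Int) (f : Int → Int) :
    cs.foldl (fun ct control =>
        List.zipWith (fun t c => if t > control then c - 1 else c) targets ct)
      (targets.map f)
    = targets.map (fun t => f t - (cs.countP (fun c => decide (c < t)) : Int)) := by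
  induction cs generalizing f with
  | nil => simp
  | cons c cs ih =>
      simp only [List.foldl_cons]
      rw [show List.zipWith (fun t c' => if t > c then c' - 1 else c') targets (targets.map f)
            = targets.map (fun t => if c < t then f t - 1 else f t) by
          rw [List.zipWith_map_right]; exact List.zipWith_self]
      rw [ih]
      apply List.map_congr_left
      intro t _
      by_cases h : c < t
      · simp [h]; ring
      · simp [h]

-- position/count characterisation: on a ≤-sorted list, sc[mid] < t iff mid < #{c ∈ sc | c < t}
lemma sorted_lt_iff_lt_countP (sc : List Int) (t : Int)
    (hs : sc.Pairwise (· ≤ ·)) (mid : Nat) (hmid : mid < sc.length) :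
    sc[mid] < t ↔ mid < sc.countP (fun c => decide (c < t)) := by
  have hpw := List.pairwise_iff_getElem.mp hs
  constructor
  · intro hlt
    have htake : (sc.take (mid + 1)).countP (fun c => decide (c < t))
        = (sc.take (mid + 1)).length := by
      rw [List.countP_eq_length]
      intro a ha
      obtain ⟨i, hi, rfl⟩ := List.mem_take_iff_getElem.mp ha
      have hi1 : i < mid + 1 := lt_of_lt_of_le hi (min_le_left _ _)
      have hi2 : i < sc.length := lt_of_lt_of_le hi (min_le_right _ _)
      rcases Nat.lt_or_ge i mid with h | h
      · exact decide_eq_true (lt_of_le_of_lt (hpw i mid hi2 hmid h) hlt)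
      · have : i = mid := by omega
        subst this; exact decide_eq_true hlt
    have hsplit : sc.countP (fun c => decide (c < t))
        = (sc.take (mid + 1)).countP (fun c => decide (c < t))
          + (sc.drop (mid + 1)).countP (fun c => decide (c < t)) := by
      conv_lhs => rw [← List.take_append_drop (mid + 1) sc]
      rw [List.countP_append]
    have hlen : (sc.take (mid + 1)).length = mid + 1 := by
      rw [List.length_take]; omega
    omega
  · intro hcnt
    by_contra hge
    rw [not_lt] at hge
    have hdrop : (sc.drop mid).countP (fun c => decide (c < t)) = 0 := by
      rw [List.countP_eq_zero]
      intro a ha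
      obtain ⟨i, hi, rfl⟩ := List.mem_iff_getElem.mp ha
      have hi' : mid + i < sc.length := by
        simp only [List.length_drop] at hi; omega
      rw [List.getElem_drop]
      have hle : sc[mid] ≤ sc[mid + i] := by
        rcases Nat.eq_zero_or_pos i with h0 | h0
        · subst h0; exact le_of_eq rfl
        · exact hpw mid (mid + i) hmid hi' (by omega)
      simpa using le_trans hge hle
    have hsplit : sc.countP (fun c => decide (c < t))
        = (sc.take mid).countP (fun c => decide (c < t))
          + (sc.drop mid).countP (fun c => decide (c < t)) := by
      conv_lhs => rw [← List.take_append_drop mid sc]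
      rw [List.countP_append]
    have h1 : (sc.take mid).countP (fun c => decide (c < t)) ≤ (sc.take mid).length :=
      List.countP_le_length
    have h2 : (sc.take mid).length ≤ mid := by rw [List.length_take]; omega
    omega

-- the binary search lands exactly on that count
lemma bsearch_eq_countP (sc : List Int) (t : Int) (hs : sc.Pairwise (· ≤ ·)) :
    ∀ lo hi, lo ≤ sc.countP (fun c => decide (c < t)) →
      sc.countP (fun c => decide (c < t)) ≤ hi → hi ≤ sc.length →
      bsearchCount sc t lo hi = sc.countP (fun c => decide (c < t)) := by
  intro lo hi
  induction lo, hi using bsearchCount.induct sc t with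
  | case1 lo hi h mid hlt ih =>
      intro h1 h2 h3
      unfold bsearchCount
      rw [dif_pos h, if_pos hlt]
      have hmid : mid < sc.length := by omega
      rw [List.getD_eq_getElem sc 0 hmid] at hlt
      have := (sorted_lt_iff_lt_countP sc t hs mid hmid).mp hlt
      exact ih (by omega) h2 h3
  | case2 lo hi h mid hge ih =>
      intro h1 h2 h3
      unfold bsearchCount
      rw [dif_pos h, if_neg hge]
      have hmid : mid < sc.length := by omega
      rw [List.getD_eq_getElem sc 0 hmid] at hge
      have : ¬ mid < sc.countP (fun c => decide (c < t)) := fun hc =>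
        hge ((sorted_lt_iff_lt_countP sc t hs mid hmid).mpr hc)
      exact ih h1 (by omega) (by omega)
  | case3 lo hi h =>
      intro h1 h2 _
      unfold bsearchCount
      rw [dif_neg h]
      omega

-- ===== VERDICT (by name: the statement is the Claim_ definition above) =====
theorem control_order_spec : Claim_equal_control_order := by
  intro targets controls nqubits _
  unfold Spec_control_order control_order control_order_alt
  simp only
  rw [foldA_split, order_eq]
  refine Prod.ext rfl ?_
  have hctf := ct_fold targets controls (fun t => t)
  rw [show targets.map (fun t => t) = targets from by simp] at hctf
  rw [hctf]
  rw [PySem.List.foldl_append_singleton_eq_map]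
  simp only [List.nil_append]
  apply List.map_congr_left
  intro t _
  have hs : (PySem.List.sorted controls (fun x => x)).Pairwise (· ≤ ·) := by
    simpa using PySem.List.sorted_pairwise controls (fun x => x)
  have hperm : (PySem.List.sorted controls (fun x => x)).Perm controls :=
    PySem.List.sorted_perm controls (fun x => x) false
  rw [bsearch_eq_countP _ t hs 0 _ (Nat.zero_le _) List.countP_le_length le_rfl,
      hperm.countP_eq]
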